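-- pv_equiv track=rewrite | github.com/Turyka/Simcarft | simcarft-python.py | generate_talent_blocks
-- ===== SOURCE A (Python) =====
-- def generate_talent_blocks(class_name, spec_name, template, talent_positions, talent_values, filename):
--     """
--     Generate talent combination blocks for any class/spec
--
--     Parameters:
--     class_name: e.g., "warrior", "deathknight"
--     spec_name: e.g., "Prot", "Blood"
--     template: the template string with placeholders like {t1}, {t2}, etc.
--     talent_positions: list of talent positions to iterate through
--     talent_values: list of possible values for each talent
--     filename: output filename
--     """
--
--     # Generate all combinations
--     blocks = []
--
--     # Create nested loops based on the number of talent positions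
--     from itertools import product
--     talent_combinations = product(talent_values, repeat=len(talent_positions))
--
--     for combo in talent_combinations:
--         # Create format dictionary
--         format_dict = {}
--         for i, talent_value in enumerate(combo):
--             format_dict[f't{talent_positions[i]}'] = talent_value
--
--         block = template.format(**format_dict)
--         blocks.append(block)
--
--     return blocks, len(blocks)
-- ===== SOURCE B (Python) =====
-- def generate_talent_blocks(class_name, spec_name, template, talent_positions, talent_values, filename):
--     # Build the format dicts incrementally: one partial dict per choice prefix,
--     # extending every partial with every value at each talent position.
--     partial = [{}]
--     for pos in talent_positions:
--         key = 't{}'.format(pos)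
--         partial = [dict(p, **{key: v}) for p in partial for v in talent_values]
--     blocks = [template.format(**d) for d in partial]
--     return blocks, len(blocks)
-- ===== Notes on version B (the rewrite author's own statement) =====
-- stated objective: alternative
-- what changed: Replaces itertools.product plus a per-combination dict rebuilt from enumerate/positions indexing by an incremental construction that folds over the positions, extending a list of partial format-dicts with every value at each step, then formats each finished dict.
-- outside the precondition, e.g. on generate_talent_blocks('c', 's', '{t1:}', [1], [2], 'f'): A returns (['2'], 1), B returns (['2'], 1); on generate_talent_blocks('c', 's', '{t1!s}', [1], [2], 'f'): A returns (['2'], 1), B returns (['2'], 1); on generate_talent_blocks('c', 's', '{t1.real}', [1], [2], 'f'): A returns (['2'], 1), B returns (['2'], 1)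
import Mathlib
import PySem

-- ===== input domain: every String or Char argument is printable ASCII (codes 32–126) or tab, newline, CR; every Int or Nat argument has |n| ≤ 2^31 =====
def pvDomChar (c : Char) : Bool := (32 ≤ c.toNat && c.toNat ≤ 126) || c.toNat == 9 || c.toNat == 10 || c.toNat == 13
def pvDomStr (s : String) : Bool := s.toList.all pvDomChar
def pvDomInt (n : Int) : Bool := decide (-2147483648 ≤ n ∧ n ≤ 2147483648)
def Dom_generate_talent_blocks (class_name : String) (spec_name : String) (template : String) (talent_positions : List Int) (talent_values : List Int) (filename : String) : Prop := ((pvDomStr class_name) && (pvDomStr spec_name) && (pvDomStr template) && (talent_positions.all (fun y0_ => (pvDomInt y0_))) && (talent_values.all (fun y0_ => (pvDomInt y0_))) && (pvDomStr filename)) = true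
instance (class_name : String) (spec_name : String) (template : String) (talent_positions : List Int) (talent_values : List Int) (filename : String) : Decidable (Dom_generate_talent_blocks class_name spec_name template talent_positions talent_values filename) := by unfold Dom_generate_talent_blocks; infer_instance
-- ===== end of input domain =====

-- B replaces itertools.product + per-combo dict rebuilding by extending a list of partial
-- format-dicts position by position (objective: alternative decomposition, same cost).

-- str.format(**d) restricted to plain replacement fields '{name}' with name a key of d
-- (exact there; Pre_ admits exactly those templates — conversions '!', specs ':' and
-- attribute/index access '.'/'[' are outside Pre_). Shared by both ports: both Pythons
-- call the same built-in str.format.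
def pvFmt (cs : List Char) (d : PySem.Dict String Int) : List Char :=
  match cs with
  | [] => []
  | '{' :: '{' :: r => '{' :: pvFmt r d
  | '}' :: '}' :: r => '}' :: pvFmt r d
  | '{' :: r =>
      let name := r.takeWhile (· ≠ '}')
      let rest := (r.dropWhile (· ≠ '}')).drop 1
      PySem.Int.toChars (d.getD (String.mk name) 0) ++ pvFmt rest d
  | c :: r => c :: pvFmt r d
termination_by cs.length
decreasing_by
  all_goals
    have h1 := List.length_dropWhile_le (fun x => !decide (x = '}')) r
    have h2 := List.length_dropWhile_le (fun x => decide (x ≠ '}')) r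
    (try simp at h1 h2)
    (try simp) <;> omega

-- ===== PORT A =====
-- itertools.product(talent_values, repeat=n): first coordinate varies slowest.
def pvProduct (vals : List Int) (n : Nat) : List (List Int) :=
  match n with
  | 0 => [[]]
  | n + 1 => vals.flatMap (fun v => (pvProduct vals n).map (fun c => v :: c))

def generate_talent_blocks (class_name : String) (spec_name : String) (template : String) (talent_positions : List Int) (talent_values : List Int) (filename : String) : List String × Int :=
  let talent_combinations := pvProduct talent_values talent_positions.length
  let blocks := talent_combinations.foldl (fun blocks combo =>
    let format_dict := (PySem.List.enumerate combo).foldl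
      (fun d iv => d.insert ("t" ++ PySem.Int.toStr (PySem.List.pyGetD talent_positions iv.1 0)) iv.2)
      PySem.Dict.empty
    blocks ++ [String.mk (pvFmt template.toList format_dict)]) []
  (blocks, (blocks.length : Int))

-- ===== PORT B =====
def generate_talent_blocks_alt (class_name : String) (spec_name : String) (template : String) (talent_positions : List Int) (talent_values : List Int) (filename : String) : List String × Int :=
  let partial_ := talent_positions.foldl
    (fun ps pos => ps.flatMap (fun p => talent_values.map (fun v =>
      p.insert ("t" ++ PySem.Int.toStr pos) v)))
    [PySem.Dict.empty]
  let blocks := partial_.map (fun d => String.mk (pvFmt template.toList d))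
  (blocks, (blocks.length : Int))

-- ===== PRECONDITION & SPEC =====
-- well-formed template: '{{'/'}}' escapes, every replacement field a plain '{name}' with
-- name ∈ keys and no '{' '!' ':' '.' '[' inside it (Python raises on unmatched braces and
-- missing keys; fields with a conversion, a format spec or attribute access are excluded
-- too — on a few of those, e.g. '{t1!s}', Python still returns, see the cites).
def pvFormatOk (cs : List Char) (keys : List String) (st : Option (List Char)) : Bool :=
  match cs, st with
  | [], none => true
  | [], some _ => false
  | c :: r, some acc =>
      if c = '}' then (String.mk acc.reverse ∈ keys) && pvFormatOk r keys none
      else if c ∈ (['{', '!', ':', '.', '['] : List Char) then false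
      else pvFormatOk r keys (some (c :: acc))
  | '{' :: '{' :: r, none => pvFormatOk r keys none
  | '}' :: '}' :: r, none => pvFormatOk r keys none
  | '{' :: r, none => pvFormatOk r keys (some [])
  | '}' :: _, none => false
  | _ :: r, none => pvFormatOk r keys none

-- Pre_ = inputs on which the Python A returns: either format is never called (some
-- positions but no values), or the template is well-formed over the generated keys.
def Pre_generate_talent_blocks (class_name : String) (spec_name : String) (template : String) (talent_positions : List Int) (talent_values : List Int) (filename : String) : Prop :=
  (talent_positions ≠ [] ∧ talent_values = []) ∨
    pvFormatOk template.toList (talent_positions.map (fun p => "t" ++ PySem.Int.toStr p)) none = true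
instance (class_name : String) (spec_name : String) (template : String) (talent_positions : List Int) (talent_values : List Int) (filename : String) : Decidable (Pre_generate_talent_blocks class_name spec_name template talent_positions talent_values filename) := by unfold Pre_generate_talent_blocks; infer_instance

def pvWitness_generate_talent_blocks : String × String × String × List Int × List Int × String :=
  ("warrior", "Prot", "talents={t1}{t2}", [1, 2], [0, 1], "out.simc")

def Spec_generate_talent_blocks (class_name : String) (spec_name : String) (template : String) (talent_positions : List Int) (talent_values : List Int) (filename : String) (out : List String × Int) : Prop := out = generate_talent_blocks_alt class_name spec_name template talent_positions talent_values filename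
instance (class_name : String) (spec_name : String) (template : String) (talent_positions : List Int) (talent_values : List Int) (filename : String) (out : List String × Int) : Decidable (Spec_generate_talent_blocks class_name spec_name template talent_positions talent_values filename out) := by unfold Spec_generate_talent_blocks; infer_instance

-- ===== CLAIM (what is proved, stated in full; the proofs are below) =====
def Claim_equal_generate_talent_blocks : Prop := ∀ (class_name : String) (spec_name : String) (template : String) (talent_positions : List Int) (talent_values : List Int) (filename : String), Dom_generate_talent_blocks class_name spec_name template talent_positions talent_values filename → Pre_generate_talent_blocks class_name spec_name template talent_positions talent_values filename → Spec_generate_talent_blocks class_name spec_name template talent_positions talent_values filename (generate_talent_blocks class_name spec_name template talent_positions talent_values filename)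

-- ===== LEMMAS AND PROOFS =====

-- the zip-fold both dict constructions are equal to
def pvZipDict (ps : List Int) (combo : List Int) (d : PySem.Dict String Int) : PySem.Dict String Int :=
  (ps.zip combo).foldl (fun d pv => d.insert ("t" ++ PySem.Int.toStr pv.1) pv.2) d

lemma pvEnumDict_eq (combo : List Int) : ∀ (pre ps : List Int) (d : PySem.Dict String Int),
    combo.length = ps.length →
    (PySem.List.enumerate combo pre.length).foldl
      (fun d iv => d.insert ("t" ++ PySem.Int.toStr (PySem.List.pyGetD (pre ++ ps) iv.1 0)) iv.2) d
    = pvZipDict ps combo d := by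
  induction combo with
  | nil =>
    intro pre ps d h
    cases ps with
    | nil => simp [PySem.List.enumerate_nil, pvZipDict]
    | cons p r => simp at h
  | cons v cs ih =>
    intro pre ps d h
    cases ps with
    | nil => simp at h
    | cons p rs =>
      have hget : PySem.List.pyGetD (pre ++ p :: rs) ((pre.length : Nat) : Int) 0 = p := by
        rw [PySem.List.pyGetD_natCast]
        simp [List.getD]
      simp only [PySem.List.enumerate_cons, List.foldl_cons, hget]
      have hstep : (pre.length : Int) + 1 = (((pre ++ [p]).length : Nat) : Int) := by simp
      rw [hstep, show pre ++ p :: rs = (pre ++ [p]) ++ rs from by simp,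
        ih (pre ++ [p]) rs _ (by simpa using h)]
      simp [pvZipDict]

-- B's foldl distributes over the accumulator list
lemma pvFoldl_flatMap (step : PySem.Dict String Int → Int → List (PySem.Dict String Int)) :
    ∀ (ps : List Int) (acc : List (PySem.Dict String Int)),
    ps.foldl (fun ac p => ac.flatMap (fun d => step d p)) acc
      = acc.flatMap (fun d => ps.foldl (fun ac p => ac.flatMap (fun d => step d p)) [d]) := by
  intro ps
  induction ps with
  | nil => intro acc; simp
  | cons p r ih =>
    intro acc
    simp only [List.foldl_cons, List.flatMap_singleton]
    rw [ih, List.flatMap_assoc]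
    simp only [← ih]

-- product-then-zip-fold = B's incremental extension
lemma pvProduct_map_eq (vals : List Int) : ∀ (ps : List Int) (d0 : PySem.Dict String Int),
    (pvProduct vals ps.length).map (fun c => pvZipDict ps c d0)
      = ps.foldl (fun ac p => ac.flatMap (fun d => vals.map (fun v =>
          d.insert ("t" ++ PySem.Int.toStr p) v))) [d0] := by
  intro ps
  induction ps with
  | nil => intro d0; simp [pvProduct, pvZipDict]
  | cons p r ih =>
    intro d0
    simp only [List.length_cons, pvProduct, List.map_flatMap, List.map_map]
    rw [List.foldl_cons, pvFoldl_flatMap, List.flatMap_singleton, List.flatMap_map]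
    refine List.flatMap_congr (fun v hv => ?_)
    rw [← ih (d0.insert ("t" ++ PySem.Int.toStr p) v)]
    refine List.map_congr_left (fun c hc => ?_)
    simp [Function.comp, pvZipDict]

lemma pvCombo_length (vals : List Int) (n : Nat) :
    ∀ c ∈ pvProduct vals n, c.length = n := by
  induction n with
  | zero => simp [pvProduct]
  | succ m ih =>
    intro c hc
    simp only [pvProduct, List.mem_flatMap, List.mem_map] at hc
    obtain ⟨v, _, c', hc', rfl⟩ := hc
    simp [ih c' hc']

-- ===== VERDICT (by name: the statement is the Claim_ definition above) =====
theorem generate_talent_blocks_spec : Claim_equal_generate_talent_blocks := by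
  intro class_name spec_name template talent_positions talent_values filename _ _
  unfold Spec_generate_talent_blocks generate_talent_blocks generate_talent_blocks_alt
  simp only [PySem.List.foldl_append_singleton_eq_map]
  have hmap : (pvProduct talent_values talent_positions.length).map (fun combo =>
      String.mk (pvFmt template.toList ((PySem.List.enumerate combo).foldl
        (fun d iv => d.insert ("t" ++ PySem.Int.toStr (PySem.List.pyGetD talent_positions iv.1 0)) iv.2)
        PySem.Dict.empty)))
      = (talent_positions.foldl (fun ps pos => ps.flatMap (fun p => talent_values.map (fun v =>
          p.insert ("t" ++ PySem.Int.toStr pos) v))) [PySem.Dict.empty]).map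
        (fun d => String.mk (pvFmt template.toList d)) := by
    rw [← pvProduct_map_eq, List.map_map]
    apply List.map_congr_left
    intro c hc
    have := pvEnumDict_eq c [] talent_positions PySem.Dict.empty
      (pvCombo_length talent_values talent_positions.length c hc)
    simpa using congrArg (fun d => String.mk (pvFmt template.toList d)) this
  simp [hmap]
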